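-- pv_equiv track=rewrite | github.com/mr-deamon/publibike_stations | config_flow.py | _search_matches
-- ===== SOURCE A (Python) =====
-- from typing import Any, Dict, List, Optional, Tuple
--
-- def _search_matches(stations: List[Dict[str, Any]], query: str) -> List[Dict[str, Any]]:
--     q = query.strip().casefold()
--     if not q:
--         return []
--     # Prioritize exact name match, then substring in name/address/city
--     exact = [s for s in stations if (s.get("name") or "").strip().casefold() == q]
--     if exact:
--         return exact
--     return [
--         s
--         for s in stations
--         if q in (s.get("name") or "").casefold()
--         or q in (s.get("address") or "").casefold()
--         or q in (s.get("city") or "").casefold()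
--     ]
-- ===== SOURCE B (Python) =====
-- from typing import Any, Dict, List
--
-- def _search_matches(stations: List[Dict[str, Any]], query: str) -> List[Dict[str, Any]]:
--     q = query.strip().casefold()
--     if not q:
--         return []
--
--     def score(s):
--         name = s.get("name") or ""
--         if name.strip().casefold() == q:
--             return 2
--         if (q in name.casefold()
--                 or q in (s.get("address") or "").casefold()
--                 or q in (s.get("city") or "").casefold()):
--             return 1
--         return 0
--
--     scored = [(score(s), s) for s in stations]
--     best = max((c for c, _ in scored), default=0)
--     if best == 0:
--         return []
--     return [s for c, s in scored if c == best]
-- ===== Notes on version B (the rewrite author's own statement) =====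
-- stated objective: alternative
-- what changed: Replaces A's staged fallback (build exact-match list, else build substring list) with a ranking algorithm: each station is scored once (2 exact, 1 substring, 0 none), the maximum score is taken, and the stations achieving that maximum are returned (empty if it is 0).
import Mathlib
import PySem

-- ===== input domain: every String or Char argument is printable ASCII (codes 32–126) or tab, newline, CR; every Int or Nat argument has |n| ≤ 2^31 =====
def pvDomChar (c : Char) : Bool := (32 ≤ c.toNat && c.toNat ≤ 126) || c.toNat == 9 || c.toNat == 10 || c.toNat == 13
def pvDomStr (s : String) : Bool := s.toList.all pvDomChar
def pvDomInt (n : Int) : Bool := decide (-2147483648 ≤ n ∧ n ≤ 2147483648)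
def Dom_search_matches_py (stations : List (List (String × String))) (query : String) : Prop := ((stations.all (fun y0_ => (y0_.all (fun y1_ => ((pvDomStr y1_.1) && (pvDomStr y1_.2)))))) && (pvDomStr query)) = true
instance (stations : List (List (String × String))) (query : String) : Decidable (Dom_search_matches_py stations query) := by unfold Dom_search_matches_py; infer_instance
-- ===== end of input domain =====

-- B replaces A's staged fallback (exact list, else substring list) by a ranking algorithm:
-- score each station once (2 exact / 1 substring / 0), take the max score, return its achievers.

-- ===== PORT A =====
-- (s.get(k) or ""): dict lookup with "" for a missing key (values are strings, so `or` only coalesces None/"" to "")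
def pvGet (s : List (String × String)) (k : String) : String :=
  (PySem.Dict.ofList s).getD k ""

-- q in (s.get(k) or "").casefold()
def pvSubIn (q : String) (s : List (String × String)) (k : String) : Bool :=
  PySem.Str.isIn q (PySem.Str.lower (pvGet s k))

def search_matches_py (stations : List (List (String × String))) (query : String) : List (List (String × String)) :=
  let q := PySem.Str.lower (PySem.Str.strip query)
  if q = "" then []
  else
    let exact := stations.filter (fun s => PySem.Str.lower (PySem.Str.strip (pvGet s "name")) == q)
    if exact ≠ [] then exact
    else stations.filter (fun s => pvSubIn q s "name" || pvSubIn q s "address" || pvSubIn q s "city")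

-- ===== PORT B =====
-- score(s) from Source B: 2 exact name match, 1 substring match, 0 otherwise
def pvScore (q : String) (s : List (String × String)) : Nat :=
  let name := pvGet s "name"
  if PySem.Str.lower (PySem.Str.strip name) == q then 2
  else if pvSubIn q s "name" || pvSubIn q s "address" || pvSubIn q s "city" then 1
  else 0

def search_matches_py_alt (stations : List (List (String × String))) (query : String) : List (List (String × String)) :=
  let q := PySem.Str.lower (PySem.Str.strip query)
  if q = "" then []
  else
    let scored := stations.map (fun s => (pvScore q s, s))
    let best := (scored.map Prod.fst).foldl max 0
    if best = 0 then []
    else (scored.filter (fun cs => cs.1 == best)).map Prod.snd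

-- ===== PRECONDITION & SPEC =====
def Spec_search_matches_py (stations : List (List (String × String))) (query : String) (out : List (List (String × String))) : Prop := out = search_matches_py_alt stations query
instance (stations : List (List (String × String))) (query : String) (out : List (List (String × String))) : Decidable (Spec_search_matches_py stations query out) := by unfold Spec_search_matches_py; infer_instance

-- ===== CLAIM (what is proved, stated in full; the proofs are below) =====
def Claim_equal_search_matches_py : Prop := ∀ (stations : List (List (String × String))) (query : String), Dom_search_matches_py stations query → Spec_search_matches_py stations query (search_matches_py stations query)

-- ===== LEMMAS AND PROOFS =====

-- abbreviations used only in the proofs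
def pvExact (q : String) (s : List (String × String)) : Bool :=
  PySem.Str.lower (PySem.Str.strip (pvGet s "name")) == q
def pvPart (q : String) (s : List (String × String)) : Bool :=
  pvSubIn q s "name" || pvSubIn q s "address" || pvSubIn q s "city"

theorem pvScore_eq (q : String) (s : List (String × String)) :
    pvScore q s = if pvExact q s then 2 else if pvPart q s then 1 else 0 := rfl

theorem foldl_max_shift (l : List Nat) (a : Nat) :
    l.foldl max a = max a (l.foldl max 0) := by
  induction l generalizing a with
  | nil => simp
  | cons x xs ih =>
      simp only [List.foldl_cons]
      rw [ih (max a x), ih (max 0 x)]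
      simp [Nat.max_comm, Nat.max_assoc, Nat.max_left_comm]

-- the maximum score is 2 / 1 / 0 according to which filters are nonempty
theorem maxScore_char (q : String) (l : List (List (String × String))) :
    ((l.map (pvScore q)).foldl max 0) =
      if l.filter (pvExact q) ≠ [] then 2
      else if l.filter (pvPart q) ≠ [] then 1 else 0 := by
  induction l with
  | nil => simp
  | cons s rest ih =>
      simp only [List.map_cons, List.foldl_cons, foldl_max_shift, ih, List.filter_cons,
        pvScore_eq]
      by_cases he : pvExact q s <;> by_cases hp : pvPart q s <;>
        simp [he, hp] <;> split_ifs <;> simp_all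

theorem map_filter_fst (f : List (String × String) → Nat) (b : Nat)
    (l : List (List (String × String))) :
    ((l.map (fun s => (f s, s))).filter (fun cs => cs.1 == b)).map Prod.snd
      = l.filter (fun s => f s == b) := by
  induction l with
  | nil => rfl
  | cons s rest ih =>
      simp only [List.map_cons, List.filter_cons]
      by_cases h : f s == b <;> simp [h, ih]

-- ===== VERDICT (by name: the statement is the Claim_ definition above) =====
theorem search_matches_py_spec : Claim_equal_search_matches_py := by
  intro stations query _
  unfold Spec_search_matches_py search_matches_py search_matches_py_alt
  by_cases hq : PySem.Str.lower (PySem.Str.strip query) = ""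
  · simp [hq]
  · simp only [hq, List.map_map, if_false]
    generalize PySem.Str.lower (PySem.Str.strip query) = q
    have hmap : (Prod.fst ∘ fun s : List (String × String) => (pvScore q s, s)) = pvScore q := by
      funext s; simp
    rw [hmap, maxScore_char, map_filter_fst]
    have hA : (fun s : List (String × String) =>
        PySem.Str.lower (PySem.Str.strip (pvGet s "name")) == q) = pvExact q := rfl
    have hP : (fun s : List (String × String) =>
        pvSubIn q s "name" || pvSubIn q s "address" || pvSubIn q s "city") = pvPart q := rfl
    rw [hA, hP]
    by_cases he : stations.filter (pvExact q) = []
    · rw [if_neg (not_not_intro he), if_neg (not_not_intro he)]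
      by_cases hp : stations.filter (pvPart q) = []
      · rw [if_neg (not_not_intro hp), if_pos rfl]
        exact hp
      · rw [if_pos hp, if_neg (by norm_num)]
        have hmem : ∀ s ∈ stations, pvExact q s = false := by
          intro s hs
          by_contra h
          have : s ∈ stations.filter (pvExact q) :=
            List.mem_filter.mpr ⟨hs, by simpa using h⟩
          simp [he] at this
        refine (List.filter_congr ?_).symm
        intro s hs
        rw [pvScore_eq, hmem s hs]
        by_cases h : pvPart q s <;> simp [h]
    · rw [if_pos he, if_pos he, if_neg (by norm_num)]
      have hfun : (fun s => pvScore q s == 2) = pvExact q := by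
        funext s; rw [pvScore_eq]
        by_cases h : pvExact q s <;> by_cases h2 : pvPart q s <;> simp [h, h2]
      rw [hfun]
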